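-- pv_equiv track=rewrite | github.com/aabhinnav1999/aabhinnav_python_repository | ibm/question1.py | getSessionCount
-- ===== SOURCE A (Python) =====
-- from typing import List, Dict
--
-- def getSessionCount(timeout: int, userIds: List[str], timestamps: List[int]) -> int:
--     events = sorted(zip(userIds, timestamps), key=lambda x: (x[0], x[1]))
--
--     last_time: Dict[str, int] = {}
--     sessions = 0
--
--     for uid, t in events:
--         if uid not in last_time:
--             sessions += 1
--         else:
--             if t - last_time[uid] > timeout:
--                 sessions += 1
--         last_time[uid] = t
--     return sessions
-- ===== SOURCE B (Python) =====
-- from typing import List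
--
-- def getSessionCount(timeout: int, userIds: List[str], timestamps: List[int]) -> int:
--     groups = {}
--     for uid, t in zip(userIds, timestamps):
--         groups.setdefault(uid, []).append(t)
--     total = 0
--     for ts in groups.values():
--         ts = sorted(ts)
--         total += 1
--         for prev, cur in zip(ts, ts[1:]):
--             if cur - prev > timeout:
--                 total += 1
--     return total
-- ===== Notes on version B (the rewrite author's own statement) =====
-- stated objective: faster
-- what changed: Instead of sorting all (uid, timestamp) pairs lexicographically and scanning them with a last-seen-time dict, B groups timestamps per user into a dict in one pass over zip(userIds, timestamps), then for each user sorts only that user's list and counts 1 session plus one per consecutive gap strictly exceeding timeout, summing over users.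
import Mathlib
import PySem

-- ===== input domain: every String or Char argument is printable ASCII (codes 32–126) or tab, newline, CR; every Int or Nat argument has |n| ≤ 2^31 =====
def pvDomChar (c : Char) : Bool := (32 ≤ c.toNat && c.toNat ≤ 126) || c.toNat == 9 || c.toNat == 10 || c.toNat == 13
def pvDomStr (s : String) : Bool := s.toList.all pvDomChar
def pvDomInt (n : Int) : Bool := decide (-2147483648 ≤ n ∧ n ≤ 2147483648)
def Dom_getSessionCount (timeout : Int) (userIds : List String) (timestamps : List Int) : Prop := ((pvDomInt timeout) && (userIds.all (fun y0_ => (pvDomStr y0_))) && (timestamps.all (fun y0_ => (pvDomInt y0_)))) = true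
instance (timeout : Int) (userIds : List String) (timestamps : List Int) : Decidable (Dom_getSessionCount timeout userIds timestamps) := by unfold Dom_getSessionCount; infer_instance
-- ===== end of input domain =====

-- B groups timestamps per user into a dict in one pass, then sorts each user's list and counts
-- 1 + (#gaps > timeout) per user, instead of A's single dict-scan over the fully lex-sorted event list.

-- ===== PORT A =====
-- events = sorted(zip(userIds, timestamps), key=lambda x: (x[0], x[1])); then one pass with a last_time dict
def getSessionCount (timeout : Int) (userIds : List String) (timestamps : List Int) : Int :=
  let events := PySem.List.sorted2 (userIds.zip timestamps) (fun x => x.1) (fun x => x.2)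
  (events.foldl
    (fun st p =>
      let sessions :=
        if st.1.contains p.1 = false then st.2 + 1
        else if p.2 - st.1.getD p.1 0 > timeout then st.2 + 1 else st.2
      (st.1.insert p.1 p.2, sessions))
    (PySem.Dict.empty, (0 : Int))).2

-- ===== PORT B =====
-- groups: dict uid -> list of timestamps (one pass over the zip); then per group sort and count
def getSessionCount_alt (timeout : Int) (userIds : List String) (timestamps : List Int) : Int :=
  let groups := (userIds.zip timestamps).foldl
    (fun d p => d.modify p.1 [] (fun l => l ++ [p.2])) PySem.Dict.empty
  groups.values.foldl
    (fun total ts =>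
      let s := PySem.List.sorted ts (fun x => x)
      (s.zip (s.drop 1)).foldl
        (fun c q => if q.2 - q.1 > timeout then c + 1 else c) (total + 1))
    (0 : Int)

-- ===== PRECONDITION & SPEC =====
def Spec_getSessionCount (timeout : Int) (userIds : List String) (timestamps : List Int) (out : Int) : Prop := out = getSessionCount_alt timeout userIds timestamps
instance (timeout : Int) (userIds : List String) (timestamps : List Int) (out : Int) : Decidable (Spec_getSessionCount timeout userIds timestamps out) := by unfold Spec_getSessionCount; infer_instance

-- ===== CLAIM (what is proved, stated in full; the proofs are below) =====
def Claim_equal_getSessionCount : Prop := ∀ (timeout : Int) (userIds : List String) (timestamps : List Int), Dom_getSessionCount timeout userIds timestamps → Spec_getSessionCount timeout userIds timestamps (getSessionCount timeout userIds timestamps)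

-- ===== LEMMAS AND PROOFS =====

def lexR (p q : String × Int) : Prop := p.1 < q.1 ∨ (p.1 = q.1 ∧ p.2 ≤ q.2)

lemma lexR_of_before (a b : String × Int)
    (h : (decide (a.1 < b.1) || (!decide (b.1 < a.1) && decide (a.2 < b.2))) = true) : lexR a b := by
  simp only [Bool.or_eq_true, Bool.and_eq_true, Bool.not_eq_true', decide_eq_true_eq, decide_eq_false_iff_not] at h
  rcases h with h | ⟨h1, h2⟩
  · exact Or.inl h
  · rcases lt_trichotomy a.1 b.1 with h3 | h3 | h3
    · exact Or.inl h3
    · exact Or.inr ⟨h3, le_of_lt h2⟩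
    · exact absurd h3 h1

lemma lexR_of_not_before (a b : String × Int)
    (h : (decide (a.1 < b.1) || (!decide (b.1 < a.1) && decide (a.2 < b.2))) = false) : lexR b a := by
  simp only [Bool.or_eq_false_iff, Bool.and_eq_false_iff, Bool.not_eq_false', decide_eq_true_eq, decide_eq_false_iff_not] at h
  obtain ⟨h1, h2⟩ := h
  rcases h2 with h2 | h2
  · exact Or.inl h2
  · rcases lt_trichotomy a.1 b.1 with h3 | h3 | h3
    · exact absurd h3 h1
    · exact Or.inr ⟨h3.symm, le_of_not_gt h2⟩
    · exact Or.inl h3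

lemma lexR_trans (a b c : String × Int) (hab : lexR a b) (hbc : lexR b c) : lexR a c := by
  rcases hab with h1 | ⟨h1, h2⟩ <;> rcases hbc with h3 | ⟨h3, h4⟩
  · exact Or.inl (lt_trans h1 h3)
  · exact Or.inl (h3 ▸ h1)
  · exact Or.inl (h1 ▸ h3)
  · exact Or.inr ⟨h1.trans h3, le_trans h2 h4⟩


lemma insertBy_cons' {α : Type} (b : α → α → Bool) (x y : α) (ys : List α) :
  PySem.List.insertBy b x (y::ys) = if b x y then x::y::ys else y :: PySem.List.insertBy b x ys := rfl

lemma insertBy_pairwise_lexR (x : String × Int) (ys : List (String × Int))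
    (h : ys.Pairwise lexR) :
    (PySem.List.insertBy (fun a b => decide (a.1 < b.1) || (!decide (b.1 < a.1) && decide (a.2 < b.2))) x ys).Pairwise lexR := by
  induction ys with
  | nil => simp [PySem.List.insertBy]
  | cons y ys ih =>
    rw [List.pairwise_cons] at h
    obtain ⟨hy, hys⟩ := h
    rw [insertBy_cons']
    by_cases hb : (decide (x.1 < y.1) || (!decide (y.1 < x.1) && decide (x.2 < y.2))) = true
    · rw [if_pos hb]
      refine List.pairwise_cons.mpr ⟨?_, List.pairwise_cons.mpr ⟨hy, hys⟩⟩
      intro z hz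
      rcases List.mem_cons.mp hz with rfl | hz
      · exact lexR_of_before x z hb
      · exact lexR_trans _ _ _ (lexR_of_before x y hb) (hy z hz)
    · rw [if_neg hb]
      refine List.pairwise_cons.mpr ⟨?_, ih hys⟩
      intro z hz
      rcases (PySem.List.mem_insertBy _ x z ys).mp hz with rfl | hz
      · exact lexR_of_not_before z y (Bool.eq_false_iff.mpr hb)
      · exact hy z hz

lemma foldl_insertBy_pairwise_lexR (xs acc : List (String × Int))
    (h : acc.Pairwise lexR) :
    (xs.foldl (fun acc x => PySem.List.insertBy (fun a b => decide (a.1 < b.1) || (!decide (b.1 < a.1) && decide (a.2 < b.2))) x acc) acc).Pairwise lexR := by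
  induction xs generalizing acc with
  | nil => exact h
  | cons x xs ih => exact ih _ (insertBy_pairwise_lexR x acc h)

lemma sorted2_pairwise_lexR (xs : List (String × Int)) :
    (PySem.List.sorted2 xs (fun x => x.1) (fun x => x.2)).Pairwise lexR :=
  foldl_insertBy_pairwise_lexR xs [] List.Pairwise.nil

def timesOf (u : String) (l : List (String × Int)) : List Int :=
  (l.filter (fun p => p.1 == u)).map (fun x => x.2)

def sessAux (timeout prev : Int) : List Int → Int
  | [] => 0
  | t :: rest => (if t - prev > timeout then 1 else 0) + sessAux timeout t rest

def sess (timeout : Int) : List Int → Int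
  | [] => 0
  | t :: rest => 1 + sessAux timeout t rest

lemma timesOf_append_self (u : String) (t : Int) (l : List (String × Int)) :
    timesOf u (l ++ [(u, t)]) = timesOf u l ++ [t] := by
  simp [timesOf, List.filter_append]

lemma timesOf_append_ne (v u : String) (t : Int) (l : List (String × Int)) (h : u ≠ v) :
    timesOf v (l ++ [(u, t)]) = timesOf v l := by
  simp [timesOf, List.filter_append, h]

lemma timesOf_eq_nil_iff (u : String) (l : List (String × Int)) :
    timesOf u l = [] ↔ u ∉ l.map (fun p => p.1) := by
  constructor
  · intro h hmem
    obtain ⟨p, hp, hpu⟩ := List.mem_map.mp hmem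
    have : p ∈ l.filter (fun p => p.1 == u) := List.mem_filter.mpr ⟨hp, by simp [hpu]⟩
    rw [show l.filter (fun p => p.1 == u) = [] by simpa [timesOf] using h] at this
    cases this
  · intro h
    rw [List.eq_nil_iff_forall_not_mem]
    intro t ht
    obtain ⟨p, hp, _⟩ := List.mem_map.mp ht
    have := List.mem_filter.mp hp
    exact h (List.mem_map.mpr ⟨p, this.1, by simpa using this.2⟩)

lemma sessAux_append (T prev t : Int) (l : List Int) :
    sessAux T prev (l ++ [t]) =
      sessAux T prev l + (if t - (prev :: l).getLast (by simp) > T then 1 else 0) := by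
  induction l generalizing prev with
  | nil => simp [sessAux]
  | cons x l ih =>
    simp only [List.cons_append, sessAux, ih x]
    rw [show (prev :: x :: l).getLast (by simp) = (x :: l).getLast (by simp) from rfl]
    ring

lemma sess_append (T t : Int) (ts : List Int) (h : ts ≠ []) :
    sess T (ts ++ [t]) = sess T ts + (if t - ts.getLast h > T then 1 else 0) := by
  match ts with
  | x :: rest =>
    simp only [List.cons_append, sess, sessAux_append]
    ring

lemma sum_map_update (ks : List String) (f g : String → Int) (u : String)
    (hnd : ks.Nodup) (hu : u ∈ ks) (hfg : ∀ v ∈ ks, v ≠ u → f v = g v) :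
    (ks.map f).sum = (ks.map g).sum + (f u - g u) := by
  induction ks with
  | nil => cases hu
  | cons k ks ih =>
    rw [List.nodup_cons] at hnd
    rcases List.mem_cons.mp hu with rfl | hu
    · have : ks.map f = ks.map g := by
        apply List.map_congr_left
        intro v hv
        exact hfg v (List.mem_cons_of_mem _ hv) (fun hvu => hnd.1 (hvu ▸ hv))
      simp [this]; ring
    · have hk : k ≠ u := fun hk => hnd.1 (hk ▸ hu)
      rw [List.map_cons, List.map_cons, List.sum_cons, List.sum_cons,
        hfg k (List.mem_cons_self) hk, ih hnd.2 hu
          (fun v hv hvu => hfg v (List.mem_cons_of_mem _ hv) hvu)]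
      ring

def stepA (timeout : Int) (st : PySem.Dict String Int × Int) (p : String × Int) :
    PySem.Dict String Int × Int :=
  let sessions :=
    if st.1.contains p.1 = false then st.2 + 1
    else if p.2 - st.1.getD p.1 0 > timeout then st.2 + 1 else st.2
  (st.1.insert p.1 p.2, sessions)

lemma foldA_spec (T : Int) (l : List (String × Int)) :
    (l.foldl (stepA T) (PySem.Dict.empty, (0 : Int))).2
      = ((PySem.Set.ofList (l.map (fun p => p.1))).map (fun u => sess T (timesOf u l))).sum
    ∧ ∀ u, ((l.foldl (stepA T) (PySem.Dict.empty, (0 : Int))).1).get? u = (timesOf u l).getLast? := by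
  induction l using List.reverseRecOn with
  | nil => simp [timesOf, PySem.Dict.get?_empty, PySem.Set.ofList_nil]
  | append_singleton l p ih =>
    obtain ⟨u, t⟩ := p
    obtain ⟨ihs, ihd⟩ := ih
    rw [List.foldl_append]
    set st := l.foldl (stepA T) (PySem.Dict.empty, (0 : Int)) with hst
    have hcont : st.1.contains u = ((timesOf u l).getLast?).isSome := by
      rw [PySem.Dict.contains_eq_isSome_get?, ihd u]
    by_cases hc : timesOf u l = []
    · -- first event of user u
      have hnot : u ∉ l.map (fun p => p.1) := (timesOf_eq_nil_iff u l).mp hc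
      have hcf : st.1.contains u = false := by rw [hcont, hc]; rfl
      constructor
      · show (stepA T st (u, t)).2 = _
        rw [show (stepA T st (u, t)).2 = st.2 + 1 by simp [stepA, hcf]]
        rw [ihs]
        rw [List.map_append, show List.map (fun (p : String × Int) => p.1) [(u, t)] = [u] from rfl,
          PySem.Set.ofList_append_singleton,
          PySem.Set.add_of_not_mem (by simpa [PySem.Set.mem_ofList] using hnot)]
        rw [List.map_append, List.sum_append]
        have h1 : (PySem.Set.ofList (l.map (fun p => p.1))).map
            (fun v => sess T (timesOf v (l ++ [(u, t)])))
            = (PySem.Set.ofList (l.map (fun p => p.1))).map (fun v => sess T (timesOf v l)) := by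
          apply List.map_congr_left
          intro v hv
          have hvne : u ≠ v := fun h => hnot (h ▸ (PySem.Set.mem_ofList _ _).mp hv)
          show sess T (timesOf v (l ++ [(u, t)])) = sess T (timesOf v l)
          rw [timesOf_append_ne v u t l hvne]
        rw [h1]
        simp [timesOf_append_self, hc, sess, sessAux]
      · intro v
        show (stepA T st (u, t)).1.get? v = _
        rw [show (stepA T st (u, t)).1 = st.1.insert u t from rfl]
        by_cases hv : v = u
        · subst hv
          rw [PySem.Dict.get?_insert_self, timesOf_append_self, List.getLast?_concat]
        · rw [PySem.Dict.get?_insert_of_ne _ _ hv, ihd v,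
            timesOf_append_ne v u t l (fun h => hv h.symm)]
    · -- user u seen before
      have hmem : u ∈ l.map (fun p => p.1) := by
        by_contra hn; exact hc ((timesOf_eq_nil_iff u l).mpr hn)
      have hlast : (timesOf u l).getLast? = some ((timesOf u l).getLast hc) :=
        List.getLast?_eq_some_getLast hc
      have hct : st.1.contains u = true := by rw [hcont, hlast]; rfl
      have hgetD : st.1.getD u 0 = (timesOf u l).getLast hc := by
        rw [PySem.Dict.getD_eq_get?_getD, ihd u, hlast]; rfl
      constructor
      · show (stepA T st (u, t)).2 = _
        rw [show (stepA T st (u, t)).2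
            = if t - (timesOf u l).getLast hc > T then st.2 + 1 else st.2 by
          simp only [stepA, hct, hgetD]
          simp]
        rw [ihs]
        rw [List.map_append, show List.map (fun (p : String × Int) => p.1) [(u, t)] = [u] from rfl,
          PySem.Set.ofList_append_singleton,
          PySem.Set.add_of_mem (by simpa [PySem.Set.mem_ofList] using hmem)]
        rw [sum_map_update (PySem.Set.ofList (l.map (fun p => p.1)))
          (fun v => sess T (timesOf v (l ++ [(u, t)]))) (fun v => sess T (timesOf v l)) u
          (PySem.Set.nodup_ofList _) (by simpa [PySem.Set.mem_ofList] using hmem)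
          (fun v hv hvu => by
            show sess T (timesOf v (l ++ [(u, t)])) = sess T (timesOf v l)
            rw [timesOf_append_ne v u t l (fun h => hvu h.symm)])]
        rw [timesOf_append_self, sess_append T t (timesOf u l) hc]
        split_ifs <;> ring
      · intro v
        show (stepA T st (u, t)).1.get? v = _
        rw [show (stepA T st (u, t)).1 = st.1.insert u t from rfl]
        by_cases hv : v = u
        · subst hv
          rw [PySem.Dict.get?_insert_self, timesOf_append_self, List.getLast?_concat]
        · rw [PySem.Dict.get?_insert_of_ne _ _ hv, ihd v,
            timesOf_append_ne v u t l (fun h => hv h.symm)]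

lemma sessAux_eq_countP (T : Int) (x : Int) (rest : List Int) :
    sessAux T x rest
      = (((x :: rest).zip rest).countP (fun q => decide (q.2 - q.1 > T)) : Int) := by
  induction rest generalizing x with
  | nil => simp [sessAux]
  | cons y r ih =>
    rw [show (x :: y :: r).zip (y :: r) = (x, y) :: (y :: r).zip r from rfl,
      List.countP_cons]
    simp only [sessAux, ih y]
    by_cases h : y - x > T
    · simp [h]; ring
    · simp [h]

lemma sess_sorted (T : Int) (ts : List Int) (h : ts ≠ []) :
    sess T (PySem.List.sorted ts (fun x => x))
      = 1 + ((((PySem.List.sorted ts (fun x => x)).zip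
          ((PySem.List.sorted ts (fun x => x)).drop 1)).countP
            (fun q => decide (q.2 - q.1 > T)) : Int)) := by
  have hne : PySem.List.sorted ts (fun x => x) ≠ [] := by
    rw [Ne, PySem.List.sorted_eq_nil_iff]; exact h
  obtain ⟨x, rest, hx⟩ := List.exists_cons_of_ne_nil hne
  rw [hx]
  simp only [sess, List.drop_one, List.tail_cons, sessAux_eq_countP]

lemma outerB (T : Int) (vs : List (List Int)) (a : Int) :
    vs.foldl
      (fun total ts =>
        let s := PySem.List.sorted ts (fun x => x)
        (s.zip (s.drop 1)).foldl
          (fun c q => if q.2 - q.1 > T then c + 1 else c) (total + 1)) a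
    = a + (vs.map (fun ts =>
        1 + ((((PySem.List.sorted ts (fun x => x)).zip
          ((PySem.List.sorted ts (fun x => x)).drop 1)).countP
            (fun q => decide (q.2 - q.1 > T)) : Int)))).sum := by
  induction vs generalizing a with
  | nil => simp
  | cons ts vs ih =>
    rw [List.foldl_cons, List.map_cons, List.sum_cons]
    show (vs.foldl _ (((PySem.List.sorted ts (fun x => x)).zip
      ((PySem.List.sorted ts (fun x => x)).drop 1)).foldl
        (fun c q => if q.2 - q.1 > T then c + 1 else c) (a + 1))) = _
    rw [show ((PySem.List.sorted ts (fun x => x)).zip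
        ((PySem.List.sorted ts (fun x => x)).drop 1)).foldl
          (fun c q => if q.2 - q.1 > T then c + 1 else c) (a + 1)
        = (a + 1) + ((((PySem.List.sorted ts (fun x => x)).zip
            ((PySem.List.sorted ts (fun x => x)).drop 1)).countP
              (fun q => decide (q.2 - q.1 > T)) : Int))
      from PySem.List.foldl_ite_add_one (fun q : Int × Int => q.2 - q.1 > T) _ (a + 1), ih]
    ring


theorem main_thm (timeout : Int) (userIds : List String) (timestamps : List Int) :
    getSessionCount timeout userIds timestamps = getSessionCount_alt timeout userIds timestamps := by
  set pairs := userIds.zip timestamps with hpairs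
  set E := PySem.List.sorted2 pairs (fun x => x.1) (fun x => x.2) with hE
  -- A as a per-user sum over the sorted event list
  have hA : getSessionCount timeout userIds timestamps
      = ((PySem.Set.ofList (E.map (fun p => p.1))).map
          (fun u => sess timeout (timesOf u E))).sum :=
    (foldA_spec timeout E).1
  -- B as a per-user sum over the grouping dict's keys
  have hgroups_keys :
      ((pairs.foldl (fun d p => d.modify p.1 [] (fun l => l ++ [p.2]))
        PySem.Dict.empty).keys) = PySem.Set.ofList (pairs.map (fun p => p.1)) := by
    rw [PySem.Dict.keys_foldl_modify_key pairs (fun p => p.1) []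
      (fun _ p => (fun l => l ++ [p.2])) PySem.Dict.empty]
    simp [PySem.Set.update_nil_left]
  have hnodup : ((pairs.foldl (fun d p => d.modify p.1 [] (fun l => l ++ [p.2]))
      PySem.Dict.empty).keys).Nodup := by
    rw [hgroups_keys]; exact PySem.Set.nodup_ofList _
  have hvals : ((pairs.foldl (fun d p => d.modify p.1 [] (fun l => l ++ [p.2]))
      PySem.Dict.empty).values)
      = (PySem.Set.ofList (pairs.map (fun p => p.1))).map (fun k => timesOf k pairs) := by
    rw [PySem.Dict.values_eq_map_keys _ hnodup [], hgroups_keys]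
    apply List.map_congr_left
    intro k _
    rw [PySem.Dict.getD_foldl_modify_append pairs PySem.Dict.empty k]
    simp [timesOf, PySem.Dict.getD_empty]
  have hB : getSessionCount_alt timeout userIds timestamps
      = ((PySem.Set.ofList (pairs.map (fun p => p.1))).map
          (fun k => 1 + ((((PySem.List.sorted (timesOf k pairs) (fun x => x)).zip
            ((PySem.List.sorted (timesOf k pairs) (fun x => x)).drop 1)).countP
              (fun q => decide (q.2 - q.1 > timeout)) : Int)))).sum := by
    unfold getSessionCount_alt
    rw [← hpairs]
    show ((pairs.foldl (fun d p => d.modify p.1 [] (fun l => l ++ [p.2]))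
        PySem.Dict.empty).values).foldl
      (fun total ts =>
        let s := PySem.List.sorted ts (fun x => x)
        (s.zip (s.drop 1)).foldl
          (fun c q => if q.2 - q.1 > timeout then c + 1 else c) (total + 1)) 0 = _
    rw [hvals, outerB, List.map_map]
    simp only [Function.comp_def, zero_add, List.drop_one]
  -- the two key sets are permutations of each other
  have hperm : E.Perm pairs := PySem.List.sorted2_perm pairs _ _ _
  have hSperm : (PySem.Set.ofList (E.map (fun p => p.1))).Perm
      (PySem.Set.ofList (pairs.map (fun p => p.1))) := by
    refine (List.perm_ext_iff_of_nodup (PySem.Set.nodup_ofList _) (PySem.Set.nodup_ofList _)).mpr ?_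
    intro a
    rw [PySem.Set.mem_ofList, PySem.Set.mem_ofList]
    exact (hperm.map (fun p => p.1)).mem_iff
  -- per-user: the times of u in E are sorted(times of u in pairs)
  have htimes : ∀ u, timesOf u E = PySem.List.sorted (timesOf u pairs) (fun x => x) := by
    intro u
    symm
    apply PySem.List.sorted_id_eq_of_perm_of_pairwise
    · exact (hperm.filter _).map _
    · have hpw : (E.filter (fun p => p.1 == u)).Pairwise lexR :=
        (sorted2_pairwise_lexR pairs).filter _
      have hpw2 : (E.filter (fun p => p.1 == u)).Pairwise (fun a b => a.2 ≤ b.2) := by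
        refine hpw.imp_of_mem ?_
        intro a b ha hb hab
        have ha1 : a.1 = u := by simpa using (List.mem_filter.mp ha).2
        have hb1 : b.1 = u := by simpa using (List.mem_filter.mp hb).2
        rcases hab with h | ⟨_, h⟩
        · rw [ha1, hb1] at h; exact absurd h (lt_irrefl u)
        · exact h
      exact List.pairwise_map.mpr hpw2
  rw [hA, hB, (hSperm.map _).sum_eq]
  apply congrArg
  apply List.map_congr_left
  intro u hu
  have hne : timesOf u pairs ≠ [] := by
    rw [Ne, timesOf_eq_nil_iff]
    simpa [PySem.Set.mem_ofList] using hu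
  show sess timeout (timesOf u E) = _
  rw [htimes u, sess_sorted timeout (timesOf u pairs) hne]

-- ===== VERDICT (by name: the statement is the Claim_ definition above) =====
theorem getSessionCount_spec : Claim_equal_getSessionCount := by
  intro timeout userIds timestamps _
  unfold Spec_getSessionCount
  exact main_thm timeout userIds timestamps
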